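-- pv_equiv track=rewrite | github.com/johnfr15/CTFs | N0PSctf/Crypto/Crypto_Rookie/circularbits_decode.py | text_to_strbit
-- ===== SOURCE A (Python) =====
-- def text_to_strbit(text: str, base: int = 8) -> int:
--     strbit = ''
--
--     for char in text:
--         i = 0
--         n = ord(char)
--
--         while i != base:
--             if n & 0x01 == 0x01:
--                 strbit += '1'
--             else:
--                 strbit += '0'
--
--             n = n >> 1
--             i += 1
--
--     return strbit[::-1]
-- ===== SOURCE B (Python) =====
-- def text_to_strbit(text: str, base: int = 8) -> str:
--     if base <= 0:
--         return ''
--     mask = (1 << base) - 1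
--     return ''.join(format(ord(c) & mask, '0{}b'.format(base)) for c in reversed(text))
-- ===== Notes on version B (the rewrite author's own statement) =====
-- stated objective: simpler
-- what changed: B replaces A's per-character LSB-first inner bit loop and final whole-string reversal by a single join over the reversed text of each character's fixed-width MSB-first binary via format(), masking to the low base bits; Pre_ excludes negative base with nonempty text, where A's inner while loop never terminates.
import Mathlib
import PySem

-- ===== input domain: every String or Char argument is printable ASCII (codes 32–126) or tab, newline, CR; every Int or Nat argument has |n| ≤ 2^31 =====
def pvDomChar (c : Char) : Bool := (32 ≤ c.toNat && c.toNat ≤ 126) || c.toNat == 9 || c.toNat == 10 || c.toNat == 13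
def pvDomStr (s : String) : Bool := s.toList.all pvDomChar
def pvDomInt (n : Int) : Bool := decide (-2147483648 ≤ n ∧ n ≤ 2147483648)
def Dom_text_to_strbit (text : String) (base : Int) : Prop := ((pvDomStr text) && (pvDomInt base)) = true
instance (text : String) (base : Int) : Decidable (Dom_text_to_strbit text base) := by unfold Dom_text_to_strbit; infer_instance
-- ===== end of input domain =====

-- B replaces A's per-char LSB-first inner bit loop + final whole-string reversal by a single
-- join over the reversed text of each character's fixed-width MSB-first binary (objective: simpler).

-- ===== PORT A =====
-- inner 'while i != base' loop of A; the 'else acc' branch only totalizes the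
-- function (in Python the loop diverges when i overshoots base, i.e. base < 0).
def pvInnerA (base i : Int) (n : Nat) (acc : List Char) : List Char :=
  if i = base then acc
  else if _h : i < base then
    pvInnerA base (i + 1) (n >>> 1) (acc ++ [if n &&& 1 == 1 then '1' else '0'])
  else acc
termination_by (base - i).toNat
decreasing_by omega

def text_to_strbit (text : String) (base : Int) : String :=
  let strbit : List Char := text.toList.foldl (fun acc c => pvInnerA base 0 c.toNat acc) []
  String.mk strbit.reverse

-- ===== PORT B =====
-- format(x, '0{b}b') for 0 ≤ x < 2^b, b ≥ 1: the b binary digits of x, MSB first.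
def pvFmtBin (b : Nat) (x : Nat) : List Char :=
  (List.range b).reverse.map (fun k => if x >>> k &&& 1 == 1 then '1' else '0')

def text_to_strbit_alt (text : String) (base : Int) : String :=
  if base ≤ 0 then ""
  else
    let b := base.toNat
    let mask := (1 <<< b) - 1
    String.mk ((text.toList.reverse.map (fun c => pvFmtBin b (c.toNat &&& mask))).flatten)

-- ===== PRECONDITION & SPEC =====
-- Pre_ excludes base < 0 with nonempty text, on which Python A never returns (its inner while loop diverges).
def Pre_text_to_strbit (text : String) (base : Int) : Prop := 0 ≤ base ∨ text = ""
instance (text : String) (base : Int) : Decidable (Pre_text_to_strbit text base) := by unfold Pre_text_to_strbit; infer_instance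
def pvWitness_text_to_strbit : String × Int := ("Hi", 8)

def Spec_text_to_strbit (text : String) (base : Int) (out : String) : Prop := out = text_to_strbit_alt text base
instance (text : String) (base : Int) (out : String) : Decidable (Spec_text_to_strbit text base out) := by unfold Spec_text_to_strbit; infer_instance

-- ===== CLAIM (what is proved, stated in full; the proofs are below) =====
def Claim_equal_text_to_strbit : Prop := ∀ (text : String) (base : Int), Dom_text_to_strbit text base → Pre_text_to_strbit text base → Spec_text_to_strbit text base (text_to_strbit text base)

-- ===== LEMMAS AND PROOFS =====

-- A's inner loop appends the low (base - i) bits of n, LSB first.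
theorem pvInnerA_eq (m : Nat) : ∀ (base i : Int) (n : Nat) (acc : List Char),
    i + m = base →
    pvInnerA base i n acc
      = acc ++ (List.range m).map (fun j => if n >>> j &&& 1 == 1 then '1' else '0') := by
  induction m with
  | zero =>
    intro base i n acc h
    rw [pvInnerA]
    simp [show i = base by omega]
  | succ m ih =>
    intro base i n acc h
    rw [pvInnerA]
    rw [if_neg (by omega), dif_pos (by omega)]
    rw [ih base (i + 1) (n >>> 1) _ (by omega)]
    rw [List.range_succ_eq_map]
    simp [List.append_assoc, Nat.shiftRight_succ_inside]

theorem pvMask_bit (b k n : Nat) (hk : k < b) :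
    (n &&& (1 <<< b - 1)) >>> k &&& 1 = n >>> k &&& 1 := by
  have h1 : ∀ m j : Nat, m >>> j &&& 1 = (m.testBit j).toNat := by
    intro m j
    rw [Nat.and_one_is_mod]
    rcases Nat.mod_two_eq_zero_or_one (m >>> j) with h | h <;>
      simp [Nat.testBit, Nat.and_comm 1, Nat.and_one_is_mod, h]
  rw [h1, h1]
  have : (n &&& (1 <<< b - 1)).testBit k = n.testBit k := by
    rw [Nat.testBit_and]
    simp [Nat.shiftLeft_eq, Nat.testBit_two_pow_sub_one, hk]
  rw [this]

-- reversed LSB-first bits of n = MSB-first bits of (n masked to b bits)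
theorem pvRev_bits (b n : Nat) :
    ((List.range b).map (fun j => if n >>> j &&& 1 == 1 then '1' else '0')).reverse
      = pvFmtBin b (n &&& (1 <<< b - 1)) := by
  unfold pvFmtBin
  rw [← List.map_reverse]
  apply List.map_congr_left
  intro k hk
  simp only [List.mem_reverse, List.mem_range] at hk
  rw [pvMask_bit b k n hk]

-- ===== VERDICT (by name: the statement is the Claim_ definition above) =====
theorem text_to_strbit_spec : Claim_equal_text_to_strbit := by
  intro text base _ hpre
  unfold Spec_text_to_strbit text_to_strbit text_to_strbit_alt
  rcases hpre with hpre' | hempty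
  swap
  · subst hempty
    by_cases h : base ≤ 0 <;> simp [h] <;> rfl
  rcases lt_or_eq_of_le hpre' with hpos | hzero
  · rw [if_neg (by omega)]
    simp only
    have hb : base = (base.toNat : Int) := (Int.toNat_of_nonneg hpre').symm
    have hfold : ∀ acc, text.toList.foldl (fun acc c => pvInnerA base 0 c.toNat acc) acc
        = acc ++ text.toList.flatMap
            (fun c => (List.range base.toNat).map
              (fun j => if c.toNat >>> j &&& 1 == 1 then '1' else '0')) := by
      intro acc
      rw [← PySem.List.foldl_append_eq_flatMap]
      apply PySem.List.foldl_congr_mem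
      intro a c _
      exact pvInnerA_eq base.toNat base 0 c.toNat a (by omega)
    rw [hfold, List.nil_append, List.reverse_flatMap]
    congr 1
    rw [List.flatMap_def]
    congr 1
    apply List.map_congr_left
    intro c _
    simp only [Function.comp]
    exact pvRev_bits base.toNat c.toNat
  · rw [if_pos (by omega)]
    have : ∀ acc (l : List Char), l.foldl (fun acc c => pvInnerA base 0 c.toNat acc) acc = acc := by
      intro acc l
      induction l generalizing acc with
      | nil => rfl
      | cons c t ih => simp [List.foldl_cons, pvInnerA, ← hzero]
    rw [this]
    rfl
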